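-- pv_equiv track=rewrite | github.com/JunDP9/aoc22 | day6/__init__.py | solution_part_two
-- ===== SOURCE A (Python) =====
-- def solution_part_two(parsed_string):
--     res = []
--     counter = 0
--     for char in parsed_string[0]:
--         if char in res:
--             while char in res:
--                 res.pop(0)
--         res.append(char)
--         counter += 1
--         if len(res) > 13: return counter
--     return counter
-- ===== SOURCE B (Python) =====
-- def solution_part_two(parsed_string):
--     s = parsed_string[0]
--     for i in range(len(s) - 13):
--         if len(set(s[i:i + 14])) == 14:
--             return i + 14
--     return len(s)
-- ===== Notes on version B (the rewrite author's own statement) =====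
-- stated objective: simpler
-- what changed: Replaces A's incremental maintenance of the longest distinct suffix (pop-from-front loop inside the scan) with independent per-window distinctness checks: for each window of 14 chars test len(set(window)) == 14 and return i+14 at the first hit, len(s) otherwise.
import Mathlib
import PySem

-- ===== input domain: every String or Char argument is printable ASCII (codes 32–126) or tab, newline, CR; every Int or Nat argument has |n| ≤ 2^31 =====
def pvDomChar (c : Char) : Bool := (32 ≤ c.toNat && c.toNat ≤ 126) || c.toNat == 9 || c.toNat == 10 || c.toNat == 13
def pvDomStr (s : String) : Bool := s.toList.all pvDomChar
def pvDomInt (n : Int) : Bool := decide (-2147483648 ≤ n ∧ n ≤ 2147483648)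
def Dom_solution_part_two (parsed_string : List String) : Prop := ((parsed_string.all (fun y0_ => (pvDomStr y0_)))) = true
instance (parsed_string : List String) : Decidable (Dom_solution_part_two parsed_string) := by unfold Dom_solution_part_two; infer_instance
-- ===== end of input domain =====

-- B replaces A's incremental longest-distinct-suffix maintenance with independent
-- per-window distinctness tests (simpler, not faster).

-- ===== PORT A =====
-- while char in res: res.pop(0)
def pvPop (c : Char) : List Char → List Char
  | [] => []
  | x :: xs => if c ∈ x :: xs then pvPop c xs else x :: xs

-- the for-loop over the chars of parsed_string[0], with state (res, counter)
def pvLoopA : List Char → List Char → Int → Int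
  | [], _, counter => counter
  | c :: rest, res, counter =>
    let res1 := if c ∈ res then pvPop c res else res
    let res2 := res1 ++ [c]
    let counter1 := counter + 1
    if res2.length > 13 then counter1 else pvLoopA rest res2 counter1

def solution_part_two (parsed_string : List String) : Int :=
  match PySem.List.pyGet? parsed_string 0 with
  | none => 0  -- Python raises IndexError here; excluded by Pre_
  | some s => pvLoopA s.toList [] 0

-- ===== PORT B =====
-- for i in range(len(s) - 13): if len(set(s[i:i+14])) == 14: return i + 14;  return len(s)
def pvLoopB (s : List Char) (i : Nat) : Int :=
  if i + 13 < s.length then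
    if (PySem.Set.ofList (PySem.List.slice s (some (i : Int)) (some ((i : Int) + 14)))).length = 14
    then (i : Int) + 14
    else pvLoopB s (i + 1)
  else (s.length : Int)
termination_by s.length - i

def solution_part_two_alt (parsed_string : List String) : Int :=
  match PySem.List.pyGet? parsed_string 0 with
  | none => 0  -- Python raises IndexError here; excluded by Pre_
  | some s => pvLoopB s.toList 0

-- ===== PRECONDITION & SPEC =====
-- Pre_ excludes only the empty list, on which A (and B) raise IndexError at parsed_string[0].
def Pre_solution_part_two (parsed_string : List String) : Prop := parsed_string ≠ []
instance (parsed_string : List String) : Decidable (Pre_solution_part_two parsed_string) := by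
  unfold Pre_solution_part_two; infer_instance
def pvWitness_solution_part_two : List String := ["mjqjpqmgbljsphdztnvjfqwrcgsmlb"]
def Spec_solution_part_two (parsed_string : List String) (out : Int) : Prop := out = solution_part_two_alt parsed_string
instance (parsed_string : List String) (out : Int) : Decidable (Spec_solution_part_two parsed_string out) := by unfold Spec_solution_part_two; infer_instance

-- ===== CLAIM (what is proved, stated in full; the proofs are below) =====
def Claim_equal_solution_part_two : Prop := ∀ (parsed_string : List String), Dom_solution_part_two parsed_string → Pre_solution_part_two parsed_string → Spec_solution_part_two parsed_string (solution_part_two parsed_string)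

-- ===== LEMMAS AND PROOFS =====

-- res is the LONGEST duplicate-free suffix of the processed prefix l
def pvInv (l res : List Char) : Prop :=
  res <:+ l ∧ res.Nodup ∧ ∀ t, t <:+ l → t.Nodup → t <:+ res

theorem pvPop_suffix (c : Char) (res : List Char) : pvPop c res <:+ res := by
  induction res with
  | nil => simp [pvPop]
  | cons x xs ih =>
    rw [pvPop]
    split
    · exact ih.trans (List.suffix_cons x xs)
    · exact List.suffix_rfl

theorem pvPop_not_mem (c : Char) (res : List Char) : c ∉ pvPop c res := by
  induction res with
  | nil => simp [pvPop]
  | cons x xs ih =>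
    rw [pvPop]
    split
    · exact ih
    · assumption

theorem pvPop_of_not_mem (c : Char) (res : List Char) (h : c ∉ res) : pvPop c res = res := by
  cases res with
  | nil => rfl
  | cons x xs => rw [pvPop, if_neg h]

theorem pvPop_max (c : Char) (res t : List Char) (ht : t <:+ res) (hc : c ∉ t) :
    t <:+ pvPop c res := by
  induction res with
  | nil => simpa [pvPop] using ht
  | cons x xs ih =>
    rw [pvPop]
    split
    · rcases List.suffix_cons_iff.mp ht with rfl | h
      · exact absurd (by assumption) hc
      · exact ih h
    · exact ht

theorem pvSuffix_append_singleton {t l : List Char} (c : Char) (h : t <:+ l) :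
    t ++ [c] <:+ l ++ [c] := by
  obtain ⟨u, rfl⟩ := h
  exact ⟨u, by simp⟩

theorem pvInv_step (l res : List Char) (c : Char) (h : pvInv l res) :
    pvInv (l ++ [c]) (pvPop c res ++ [c]) := by
  obtain ⟨hsuf, hnd, hmax⟩ := h
  refine ⟨pvSuffix_append_singleton c ((pvPop_suffix c res).trans hsuf), ?_, ?_⟩
  · have h1 : (pvPop c res).Nodup := hnd.sublist (pvPop_suffix c res).sublist
    simp [List.nodup_append, h1]
    exact fun a ha hac => pvPop_not_mem c res (hac ▸ ha)
  · intro t ht htnd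
    rcases List.eq_nil_or_concat t with rfl | ⟨t', d, rfl⟩
    · exact List.nil_suffix
    · obtain ⟨u, hu⟩ := ht
      simp only [List.concat_eq_append] at htnd hu ⊢
      have hd : d = c := by
        have h2 := congrArg List.getLast? hu
        simp at h2
        exact h2
      subst hd
      have hl2 : l = u ++ t' := by
        have h3 : (u ++ t') ++ [d] = l ++ [d] := by simpa using hu
        exact (List.append_cancel_right h3).symm
      have ht' : t' <:+ l := ⟨u, hl2.symm⟩
      have hnd' : t'.Nodup := htnd.sublist (List.sublist_append_left t' [d])
      have hc' : d ∉ t' := by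
        simp [List.nodup_append] at htnd
        intro hm
        exact (htnd.2 d hm) rfl
      exact pvSuffix_append_singleton d (pvPop_max d res t' (hmax t' ht' hnd') hc')

theorem pvOfList_sublist (xs : List Char) : List.Sublist (PySem.Set.ofList xs : List Char) xs := by
  induction xs using List.reverseRecOn with
  | nil => simp [PySem.Set.ofList_nil]
  | append_singleton xs x ih =>
    rw [PySem.Set.ofList_append_singleton, PySem.Set.add_eq_ite]
    split
    · exact ih.trans (List.sublist_append_left xs [x])
    · exact List.Sublist.append ih (List.Sublist.refl [x])

theorem pvOfList_length_iff (xs : List Char) :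
    (PySem.Set.ofList xs : List Char).length = xs.length ↔ xs.Nodup := by
  constructor
  · intro h
    have h2 := (pvOfList_sublist xs).eq_of_length h
    rw [← h2]
    exact PySem.Set.nodup_ofList xs
  · intro h
    rw [PySem.Set.ofList_eq_self_of_nodup xs h]

-- with pvInv, res reaches length 14 exactly when the last 14 chars of l are distinct
theorem pvLen14_iff (l res : List Char) (h : pvInv l res) (hl : 14 ≤ l.length) :
    14 ≤ res.length ↔ (l.drop (l.length - 14)).Nodup := by
  obtain ⟨hsuf, hnd, hmax⟩ := h
  constructor
  · intro h14
    obtain ⟨u, rfl⟩ := hsuf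
    rw [List.drop_append]
    have h1 : List.drop ((u ++ res).length - 14) u = [] := by
      apply List.drop_eq_nil_of_le
      simp; omega
    rw [h1, List.nil_append]
    exact hnd.sublist (List.drop_suffix _ _).sublist
  · intro hw
    have hsfx := hmax _ (List.drop_suffix (l.length - 14) l) hw
    have hlen := hsfx.length_le
    rw [List.length_drop] at hlen
    omega

-- the main correspondence between A's scan position k and B's window index k-13
theorem pvMain (s : List Char) : ∀ n k res, n = s.length - k → k ≤ s.length →
    pvInv (s.take k) res → res.length ≤ 13 →
    pvLoopA (s.drop k) res (k : Int) = pvLoopB s (k - 13) := by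
  intro n
  induction n with
  | zero =>
    intro k res hn hk _ _
    have hks : k = s.length := by omega
    subst hks
    rw [List.drop_length, pvLoopA, pvLoopB, if_neg (by omega)]
  | succ n ih =>
    intro k res hn hk hinv hlen
    have hks : k < s.length := by omega
    rw [List.drop_eq_getElem_cons hks, pvLoopA]
    set c := s[k] with hc
    have hres1 : (if c ∈ res then pvPop c res else res) = pvPop c res := by
      split
      · rfl
      · rw [pvPop_of_not_mem c res (by assumption)]
    rw [hres1]
    have htake : s.take (k + 1) = s.take k ++ [c] := by
      rw [List.take_add_one, List.getElem?_eq_getElem hks]; rfl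
    have hinv' : pvInv (s.take (k + 1)) (pvPop c res ++ [c]) := by
      rw [htake]; exact pvInv_step _ _ _ hinv
    have hf : (pvPop c res ++ [c]).length = (pvPop c res).length + 1 := by simp
    have hlen2 : (pvPop c res ++ [c]).length ≤ k + 1 := by
      have h0 := hinv'.1.length_le
      simp [List.length_take] at h0
      omega
    have hcast : (k : Int) + 1 = ((k + 1 : Nat) : Int) := by push_cast; ring
    by_cases hk13 : 13 ≤ k
    · -- B's window at i = k - 13 is exactly the last 14 chars of s.take (k+1)
      have hwin : PySem.List.slice s (some ((k - 13 : Nat) : Int)) (some (((k - 13 : Nat) : Int) + 14))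
          = List.take 14 (List.drop (k - 13) s) := by
        rw [show (((k - 13 : Nat) : Int) + 14) = (((k - 13 + 14 : Nat)) : Int) by push_cast; ring]
        rw [PySem.List.slice_natCast]
        congr 1
        omega
      have hwin2 : (s.take (k + 1)).drop ((s.take (k + 1)).length - 14)
          = List.take 14 (List.drop (k - 13) s) := by
        have hmin : (s.take (k + 1)).length = k + 1 := by rw [List.length_take]; omega
        have e1 : k + 1 - 14 = k - 13 := by omega
        have e2 : k + 1 - (k - 13) = 14 := by omega
        rw [hmin, e1, List.drop_take, e2]
      have hwlen : (List.take 14 (List.drop (k - 13) s)).length = 14 := by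
        rw [List.length_take, List.length_drop]; omega
      have hiff : 14 ≤ (pvPop c res ++ [c]).length ↔
          (List.take 14 (List.drop (k - 13) s)).Nodup := by
        rw [← hwin2]
        exact pvLen14_iff _ _ hinv' (by rw [List.length_take]; omega)
      by_cases hbig : (pvPop c res ++ [c]).length > 13
      · have hnodup := hiff.mp (by omega)
        rw [if_pos hbig, pvLoopB, if_pos (by omega), hwin, if_pos]
        · omega
        · rw [PySem.Set.ofList_eq_self_of_nodup _ hnodup]
          exact hwlen
      · rw [if_neg hbig, pvLoopB, if_pos (by omega), hwin, if_neg]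
        · have hrec := ih (k + 1) (pvPop c res ++ [c]) (by omega) (by omega) hinv' (by omega)
          rw [hcast, hrec]
          congr 1
          omega
        · intro habs
          have hnd2 : (List.take 14 (List.drop (k - 13) s)).Nodup :=
            (pvOfList_length_iff _).mp (by rw [habs, hwlen])
          have := hiff.mpr hnd2
          omega
    · -- k < 13: res2 is too short to fire, and both B indices are 0
      have hsmall : ¬ (pvPop c res ++ [c]).length > 13 := by omega
      rw [if_neg hsmall]
      have hrec := ih (k + 1) (pvPop c res ++ [c]) (by omega) (by omega) hinv' (by omega)
      rw [hcast, hrec]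
      congr 1
      omega

-- ===== VERDICT (by name: the statement is the Claim_ definition above) =====
theorem solution_part_two_spec : Claim_equal_solution_part_two := by
  intro parsed_string _ hpre
  unfold Spec_solution_part_two solution_part_two solution_part_two_alt
  cases parsed_string with
  | nil => exact absurd rfl hpre
  | cons s rest =>
    rw [PySem.List.pyGet?_zero_cons]
    have hinv0 : pvInv ((s.toList).take 0) [] :=
      ⟨List.suffix_rfl, List.nodup_nil, fun t ht _ => by simpa using ht⟩
    have := pvMain s.toList (s.toList.length) 0 [] (by omega) (by omega) hinv0 (by simp)
    simpa using this
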